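-- pv_equiv track=rewrite | github.com/urbikn/feri-urnik | formater.py | createCell
-- ===== SOURCE A (Python) =====
-- def createCell(lengt, data):
--     string = "#"
--
--     if data in ["#"," ","&","-","=","$"]:
--         for i in range(0,lengt):
--             string += data
--
--         string = string[:-1]
--     else:
--         end = lengt - len(data) - 1
--       #  if end % 2 != 0: end += 1 # If the number is odd
--
--         for i in range(0, end):
--             if i % 2 == 0:
--                 data = "{} ".format(data)
--             else:
--                 data = " {}".format(data)
--
--         string = "#%s" % data
--
--     return string
-- ===== SOURCE B (Python) =====
-- def createCell(lengt, data):
--     if data in ["#", " ", "&", "-", "=", "$"]: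
--         return ('#' + data * lengt)[:-1]
--     end = lengt - len(data) - 1
--     left = end // 2
--     right = end - left
--     return '#' + ' ' * left + data + ' ' * right
-- ===== Notes on version B (the rewrite author's own statement) =====
-- stated objective: simpler
-- what changed: The alternating prepend/append padding loop is replaced by a closed-form floor/ceil split of the padding (left = end//2 spaces, right = end - end//2 spaces), and the repeat loop of branch 1 by string multiplication.
import Mathlib
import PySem

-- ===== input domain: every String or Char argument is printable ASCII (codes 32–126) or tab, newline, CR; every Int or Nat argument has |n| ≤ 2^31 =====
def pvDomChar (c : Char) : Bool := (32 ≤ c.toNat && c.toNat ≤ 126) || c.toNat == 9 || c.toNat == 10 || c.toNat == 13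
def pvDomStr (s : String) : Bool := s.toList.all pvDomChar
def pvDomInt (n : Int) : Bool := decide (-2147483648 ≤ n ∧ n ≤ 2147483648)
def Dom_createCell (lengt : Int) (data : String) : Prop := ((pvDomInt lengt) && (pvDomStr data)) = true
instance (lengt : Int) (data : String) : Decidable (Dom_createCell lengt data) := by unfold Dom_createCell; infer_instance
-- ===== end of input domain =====

-- B replaces A's alternating prepend/append padding loop by a closed-form floor/ceil space split
-- (and branch 1's repeat loop by string multiplication); objective: simpler. Equivalence proved on all inputs.

-- ===== PORT A =====
def createCell (lengt : Int) (data : String) : String :=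
  -- string = "#"; if data in ["#"," ","&","-","=","$"]: ...
  if data = "#" ∨ data = " " ∨ data = "&" ∨ data = "-" ∨ data = "=" ∨ data = "$" then
    -- for i in range(0, lengt): string += data ; string = string[:-1]
    let s := (PySem.List.pyRange 0 lengt 1).foldl (fun s _ => s ++ data.toList) ['#']
    String.ofList (PySem.List.slice s none (some (-1)))
  else
    -- end = lengt - len(data) - 1; alternating loop mutating data; string = "#" + data
    let e := lengt - (data.toList.length : Int) - 1
    let d := (PySem.List.pyRange 0 e 1).foldl
      (fun d i => if PySem.Int.mod i 2 = 0 then d ++ [' '] else ' ' :: d) data.toList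
    String.ofList ('#' :: d)

-- ===== PORT B =====
def createCell_alt (lengt : Int) (data : String) : String :=
  if data = "#" ∨ data = " " ∨ data = "&" ∨ data = "-" ∨ data = "=" ∨ data = "$" then
    -- ('#' + data * lengt)[:-1]
    String.ofList (PySem.List.slice ('#' :: PySem.List.pyRepeat data.toList lengt) none (some (-1)))
  else
    let e := lengt - (data.toList.length : Int) - 1
    let left := PySem.Int.floordiv e 2
    let right := e - left
    String.ofList ('#' :: (PySem.List.pyRepeat [' '] left ++ data.toList ++ PySem.List.pyRepeat [' '] right))

-- ===== PRECONDITION & SPEC =====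
def Spec_createCell (lengt : Int) (data : String) (out : String) : Prop := out = createCell_alt lengt data
instance (lengt : Int) (data : String) (out : String) : Decidable (Spec_createCell lengt data out) := by unfold Spec_createCell; infer_instance

-- ===== CLAIM (what is proved, stated in full; the proofs are below) =====
def Claim_equal_createCell : Prop := ∀ (lengt : Int) (data : String), Dom_createCell lengt data → Spec_createCell lengt data (createCell lengt data)

-- ===== LEMMAS AND PROOFS =====

-- branch 1: the append loop builds the initial segment followed by data repeated
theorem foldl_append_repeat (L : List Char) (r : List Int) (init : List Char) :
    r.foldl (fun s _ => s ++ L) init = init ++ (List.replicate r.length L).flatten := by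
  induction r generalizing init with
  | nil => simp
  | cons x xs ih => simp [List.foldl_cons, ih, List.replicate_succ]

-- branch 2 over a natural count: the alternating loop over range(0, n) distributes
-- ⌊n/2⌋ spaces left and n - ⌊n/2⌋ spaces right
theorem alt_loop_eq (n : Nat) (d : List Char) :
    (PySem.List.pyRange 0 (n : Int) 1).foldl
      (fun d i => if PySem.Int.mod i 2 = 0 then d ++ [' '] else ' ' :: d) d
      = List.replicate (n / 2) ' ' ++ d ++ List.replicate (n - n / 2) ' ' := by
  induction n with
  | zero => simp [PySem.List.pyRange_one_eq_nil]
  | succ n ih =>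
    rw [show ((n + 1 : Nat) : Int) = (n : Int) + 1 by push_cast; ring,
      PySem.List.pyRange_one_succ_right (by exact_mod_cast Nat.zero_le n),
      List.foldl_append, ih]
    simp only [List.foldl_cons, List.foldl_nil]
    have hmm := PySem.Int.floordiv_mul_add_mod (n : Int) 2
    have hfd : PySem.Int.floordiv (n : Int) 2 = ((n / 2 : Nat) : Int) := by
      rw [PySem.Int.floordiv_eq_iff_of_pos (by norm_num)]
      constructor <;> push_cast <;> omega
    rcases Nat.even_or_odd n with he | ho
    · have h2 : n % 2 = 0 := Nat.even_iff.mp he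
      have hz : PySem.Int.mod (n : Int) 2 = 0 := by rw [hfd] at hmm; push_cast at hmm; omega
      rw [if_pos hz]
      have hl : (n + 1) / 2 = n / 2 := by omega
      rw [hl]
      have hr : n + 1 - n / 2 = (n - n / 2) + 1 := by omega
      rw [hr, List.replicate_succ' (n := n - n / 2)]
      simp
    · have h2 : n % 2 = 1 := Nat.odd_iff.mp ho
      have hz : ¬ PySem.Int.mod (n : Int) 2 = 0 := by rw [hfd] at hmm; push_cast at hmm; omega
      rw [if_neg hz]
      have hl : (n + 1) / 2 = n / 2 + 1 := by omega
      rw [hl]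
      have hr : n + 1 - (n / 2 + 1) = n - n / 2 := by omega
      rw [hr, List.replicate_succ (n := n / 2)]
      simp

-- branch 2, all of Int: A's loop result equals B's floor/ceil space split
theorem branch2_eq (e : Int) (d : List Char) :
    (PySem.List.pyRange 0 e 1).foldl
      (fun d i => if PySem.Int.mod i 2 = 0 then d ++ [' '] else ' ' :: d) d
      = PySem.List.pyRepeat [' '] (PySem.Int.floordiv e 2) ++ d
          ++ PySem.List.pyRepeat [' '] (e - PySem.Int.floordiv e 2) := by
  by_cases hpos : 0 ≤ e
  · obtain ⟨n, hn⟩ : ∃ n : Nat, e = (n : Int) := ⟨e.toNat, by omega⟩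
    subst hn
    rw [alt_loop_eq]
    have hfd : PySem.Int.floordiv (n : Int) 2 = ((n / 2 : Nat) : Int) := by
      rw [PySem.Int.floordiv_eq_iff_of_pos (by norm_num)]
      constructor <;> push_cast <;> omega
    have e1 : ((n / 2 : Nat) : Int).toNat = n / 2 := by omega
    have e2 : ((n : Int) - ((n / 2 : Nat) : Int)).toNat = n - n / 2 := by omega
    rw [hfd, PySem.List.pyRepeat_singleton, PySem.List.pyRepeat_singleton, e1, e2]
  · have hnil : PySem.List.pyRange 0 e 1 = [] := PySem.List.pyRange_one_eq_nil (by omega)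
    have hfd : PySem.Int.floordiv e 2 < 0 := by
      rw [PySem.Int.floordiv_lt_iff_lt_mul (by norm_num)]; omega
    have hle : e ≤ PySem.Int.floordiv e 2 := by
      rw [PySem.Int.le_floordiv_iff_mul_le (by norm_num)]; omega
    rw [hnil, PySem.List.pyRepeat_singleton, PySem.List.pyRepeat_singleton,
      Int.toNat_of_nonpos (by omega), Int.toNat_of_nonpos (by omega)]
    simp

-- ===== VERDICT (by name: the statement is the Claim_ definition above) =====
theorem createCell_spec : Claim_equal_createCell := by
  intro lengt data _
  simp only [Spec_createCell, createCell, createCell_alt]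
  by_cases hc : data = "#" ∨ data = " " ∨ data = "&" ∨ data = "-" ∨ data = "=" ∨ data = "$"
  · rw [if_pos hc, if_pos hc]
    congr 2
    rw [foldl_append_repeat, PySem.List.length_pyRange_one]
    rcases hc with h | h | h | h | h | h <;> subst h <;>
      simp [PySem.List.pyRepeat, List.flatten_replicate_singleton]
  · rw [if_neg hc, if_neg hc, branch2_eq]
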